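-- pv_equiv track=rewrite | github.com/zhenyakeg/final_contest_2nd_term | simmetrical_sequence.py | find_symmetrical_part
-- ===== SOURCE A (Python) =====
-- def find_symmetrical_part(seq, start = 0):
--     i = 0
--     while i < len(seq)//2 and seq[i] == seq[len(seq) - i -1]:
--         i+=1
--     if i == len(seq)//2:
--         return start
--     else:
--         return find_symmetrical_part(seq[1::], start + 1)
-- ===== SOURCE B (Python) =====
-- def find_symmetrical_part(seq, start=0):
--     # Iterative: precompute the reversed sequence once, then find the smallest k
--     # whose suffix seq[k:] equals the matching prefix of the reverse (i.e. is a palindrome).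
--     rev = seq[::-1]
--     n = len(seq)
--     k = 0
--     while seq[k:] != rev[:n - k]:
--         k += 1
--     return start + k
-- ===== Notes on version B (the rewrite author's own statement) =====
-- stated objective: alternative
-- what changed: Replaces A's recursion-per-start (each re-checking the suffix with a two-pointer half scan) by a single iterative loop that reverses the sequence once and compares each suffix to the matching prefix of the reverse by slice equality.
import Mathlib
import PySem

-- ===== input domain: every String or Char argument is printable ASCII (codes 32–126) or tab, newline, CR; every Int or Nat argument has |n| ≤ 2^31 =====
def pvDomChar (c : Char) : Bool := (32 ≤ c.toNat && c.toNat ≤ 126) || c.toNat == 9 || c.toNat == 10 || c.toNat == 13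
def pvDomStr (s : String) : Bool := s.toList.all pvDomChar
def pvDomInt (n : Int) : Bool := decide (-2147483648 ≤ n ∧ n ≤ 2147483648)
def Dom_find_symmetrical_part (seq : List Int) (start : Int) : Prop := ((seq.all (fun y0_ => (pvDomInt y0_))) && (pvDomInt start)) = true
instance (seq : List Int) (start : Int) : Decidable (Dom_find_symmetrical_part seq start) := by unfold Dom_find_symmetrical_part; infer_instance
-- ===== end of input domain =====

-- B replaces A's recursion-per-start (with a two-pointer half check) by one iterative
-- loop comparing each suffix to the matching prefix of the once-computed reverse (iterative slice-comparison decomposition).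

-- ===== PORT A =====
-- the while loop: i advances while i < len//2 and seq[i] == seq[len-i-1]; returns final i
def palHalf (seq : List Int) (i : Nat) : Nat :=
  if _h : i < seq.length / 2 then
    if PySem.List.pyGet? seq (i : Int) = PySem.List.pyGet? seq ((seq.length : Int) - (i : Int) - 1) then
      palHalf seq (i + 1)
    else i
  else i
termination_by seq.length / 2 - i

def find_symmetrical_part (seq : List Int) (start : Int) : Int :=
  let i := palHalf seq 0
  if i = seq.length / 2 then start
  else find_symmetrical_part (PySem.List.slice seq (some 1) none) (start + 1)
termination_by seq.length
decreasing_by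
  rename_i h
  rw [PySem.List.slice_from_one]
  cases seq with
  | nil =>
      exact absurd (show palHalf [] 0 = List.length ([] : List Int) / 2 by
        rw [palHalf.eq_def]; simp) h
  | cons a t => simp
-- ===== PORT B =====
-- the while loop: k advances while seq[k:] != rev[:n-k]; returns final k
def altLoop (seq rev : List Int) (k : Nat) : Nat :=
  if PySem.List.slice seq (some (k : Int)) none
      = PySem.List.slice rev none (some ((seq.length : Int) - (k : Int))) then k
  else altLoop seq rev (k + 1)
termination_by seq.length + rev.length + 1 - k
decreasing_by
  rename_i h
  have hle : k ≤ seq.length + rev.length := by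
    by_contra hbig
    apply h
    rw [PySem.List.slice_from_natCast, List.drop_eq_nil_iff.mpr (by omega)]
    simp only [PySem.List.slice, PySem.List.clampIdx]
    rw [if_pos (by omega), if_pos (by omega)]
    simp
  omega
def find_symmetrical_part_alt (seq : List Int) (start : Int) : Int :=
  let rev := seq.reverse   -- seq[::-1]
  start + (altLoop seq rev 0 : Int)

-- ===== PRECONDITION & SPEC =====
def Spec_find_symmetrical_part (seq : List Int) (start : Int) (out : Int) : Prop := out = find_symmetrical_part_alt seq start
instance (seq : List Int) (start : Int) (out : Int) : Decidable (Spec_find_symmetrical_part seq start out) := by unfold Spec_find_symmetrical_part; infer_instance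

-- ===== CLAIM (what is proved, stated in full; the proofs are below) =====
def Claim_equal_find_symmetrical_part : Prop := ∀ (seq : List Int) (start : Int), Dom_find_symmetrical_part seq start → Spec_find_symmetrical_part seq start (find_symmetrical_part seq start)

-- ===== LEMMAS AND PROOFS =====

-- B's loop condition at k ≤ len says precisely: the suffix seq[k:] is a palindrome
lemma cond_iff (seq : List Int) (k : Nat) (hk : k ≤ seq.length) :
    (PySem.List.slice seq (some (k : Int)) none
      = PySem.List.slice seq.reverse none (some ((seq.length : Int) - (k : Int))))
    ↔ (seq.drop k).reverse = seq.drop k := by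
  rw [PySem.List.slice_from_natCast]
  have hnn : (0 : Int) ≤ (seq.length : Int) - (k : Int) := by omega
  rw [PySem.List.slice_to _ hnn]
  have ht : ((seq.length : Int) - (k : Int)).toNat = seq.length - k := by omega
  rw [ht, ← List.reverse_drop, eq_comm]

-- A's while loop reaches len//2 iff all half-positions match
lemma palHalf_eq_iff (seq : List Int) (i : Nat) (hi : i ≤ seq.length / 2) :
    palHalf seq i = seq.length / 2 ↔
      ∀ j, i ≤ j → j < seq.length / 2 → seq.getD j 0 = seq.getD (seq.length - 1 - j) 0 := by
  generalize hd : seq.length / 2 - i = d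
  induction d generalizing i with
  | zero =>
    have : i = seq.length / 2 := by omega
    subst this
    constructor
    · intro _ j hj1 hj2; omega
    · intro _; rw [palHalf.eq_def]; simp
  | succ d ih =>
    have hlt : i < seq.length / 2 := by omega
    have hi1 : i < seq.length := by omega
    have hi2 : seq.length - 1 - i < seq.length := by omega
    have hcast : (seq.length : Int) - (i : Int) - 1 = ((seq.length - 1 - i : Nat) : Int) := by omega
    have hbridge :
        (PySem.List.pyGet? seq (i : Int) = PySem.List.pyGet? seq ((seq.length : Int) - (i : Int) - 1))
        ↔ seq.getD i 0 = seq.getD (seq.length - 1 - i) 0 := by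
      rw [hcast, PySem.List.pyGet?_natCast, PySem.List.pyGet?_natCast,
          List.getElem?_eq_getElem hi1, List.getElem?_eq_getElem hi2,
          List.getD_eq_getElem seq 0 hi1, List.getD_eq_getElem seq 0 hi2]
      simp
    rw [palHalf]
    rw [dif_pos hlt]
    by_cases hc : PySem.List.pyGet? seq (i : Int) = PySem.List.pyGet? seq ((seq.length : Int) - (i : Int) - 1)
    · rw [if_pos hc, ih (i + 1) (by omega) (by omega)]
      constructor
      · intro hall j hj1 hj2
        rcases Nat.eq_or_lt_of_le hj1 with h | h
        · subst h; exact hbridge.mp hc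
        · exact hall j h hj2
      · intro hall j hj1 hj2; exact hall j (by omega) hj2
    · rw [if_neg hc]
      constructor
      · intro h; omega
      · intro hall; exact absurd (hbridge.mpr (hall i le_rfl hlt)) hc

-- matching on the first half is the same as being a palindrome
lemma half_pal_iff (seq : List Int) :
    (∀ j, j < seq.length / 2 → seq.getD j 0 = seq.getD (seq.length - 1 - j) 0)
    ↔ seq.reverse = seq := by
  constructor
  · intro h
    apply List.ext_getElem (by simp)
    intro i h1 h2
    rw [List.getElem_reverse]
    have hs : seq.getD (seq.length - 1 - i) 0 = seq.getD i 0 := by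
      by_cases hc : i < seq.length / 2
      · exact (h i hc).symm
      · by_cases hc2 : seq.length - 1 - i < seq.length / 2
        · have hx := h (seq.length - 1 - i) hc2
          rw [show seq.length - 1 - (seq.length - 1 - i) = i from by omega] at hx
          exact hx
        · rw [show seq.length - 1 - i = i from by omega]
    rw [List.getD_eq_getElem seq 0 (show seq.length - 1 - i < seq.length by omega),
        List.getD_eq_getElem seq 0 h2] at hs
    exact hs
  · intro h j hj
    have h1 : j < seq.length := by omega
    have h2 : seq.length - 1 - j < seq.length := by omega
    have hx : seq.reverse.getD j 0 = seq.getD j 0 := by rw [h]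
    rw [List.getD_eq_getElem seq.reverse 0 (by simpa using h1), List.getElem_reverse,
        List.getD_eq_getElem seq 0 h1] at hx
    rw [List.getD_eq_getElem seq 0 h1, List.getD_eq_getElem seq 0 h2]
    exact hx.symm

-- A's palindrome test: palHalf from 0 reaches len//2 iff seq is a palindrome
lemma palHalf_pal (seq : List Int) :
    palHalf seq 0 = seq.length / 2 ↔ seq.reverse = seq := by
  rw [palHalf_eq_iff seq 0 (Nat.zero_le _), ← half_pal_iff]
  constructor
  · intro h j hj; exact h j (Nat.zero_le _) hj
  · intro h j _ hj; exact h j hj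

-- B's loop on a cons, started one step in, is one more than the loop on the tail
lemma altLoop_shift (a : Int) (t : List Int) (k : Nat) (hk : k ≤ t.length) :
    altLoop (a :: t) (a :: t).reverse (k + 1) = altLoop t t.reverse k + 1 := by
  generalize hd : t.length - k = d
  induction d generalizing k with
  | zero =>
    have hke : k = t.length := by omega
    subst hke
    rw [altLoop]
    rw [if_pos ((cond_iff (a :: t) (t.length + 1) (by simp)).mpr (by simp))]
    rw [altLoop]
    rw [if_pos ((cond_iff t t.length le_rfl).mpr (by simp))]
  | succ d ih =>
    have hiff : (PySem.List.slice (a :: t) (some ((k + 1 : Nat) : Int)) none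
          = PySem.List.slice (a :: t).reverse none (some (((a :: t).length : Int) - ((k + 1 : Nat) : Int))))
        ↔ (PySem.List.slice t (some (k : Int)) none
          = PySem.List.slice t.reverse none (some ((t.length : Int) - (k : Int)))) := by
      rw [cond_iff (a :: t) (k + 1) (by simp; omega), cond_iff t k (by omega)]
      simp [List.drop_succ_cons]
    by_cases hc : PySem.List.slice t (some (k : Int)) none
        = PySem.List.slice t.reverse none (some ((t.length : Int) - (k : Int)))
    · have hc2 := hiff.mpr hc
      conv_lhs => rw [altLoop]
      conv_rhs => rw [altLoop]
      rw [if_pos hc2, if_pos hc]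
    · have hc2 := fun hh => hc (hiff.mp hh)
      conv_lhs => rw [altLoop]
      conv_rhs => rw [altLoop]
      rw [if_neg hc2, if_neg hc]
      exact ih (k + 1) (by omega) (by omega)

-- the main bridge: A equals start + B's loop count
lemma main_eq (seq : List Int) : ∀ start : Int,
    find_symmetrical_part seq start = start + (altLoop seq seq.reverse 0 : Int) := by
  induction seq with
  | nil =>
    intro start
    rw [find_symmetrical_part]
    rw [altLoop]
    have hp : palHalf [] 0 = 0 := by rw [palHalf.eq_def]; simp
    simp [hp]
  | cons a t ih =>
    intro start
    rw [find_symmetrical_part]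
    by_cases h : palHalf (a :: t) 0 = (a :: t).length / 2
    · rw [if_pos h]
      have hpal : (a :: t).reverse = a :: t := (palHalf_pal (a :: t)).mp h
      have hc0 : PySem.List.slice (a :: t) (some ((0 : Nat) : Int)) none
          = PySem.List.slice (a :: t).reverse none (some (((a :: t).length : Int) - ((0 : Nat) : Int))) :=
        (cond_iff (a :: t) 0 (by simp)).mpr (by simpa using hpal)
      rw [altLoop, if_pos hc0]
      simp
    · simp only [if_neg h]
      rw [PySem.List.slice_from_one]
      simp only [List.tail_cons]
      rw [ih (start + 1)]
      have hnpal : ¬ (a :: t).reverse = a :: t := fun hp => h ((palHalf_pal (a :: t)).mpr hp)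
      conv_rhs => rw [altLoop]
      rw [if_neg (by rw [cond_iff (a :: t) 0 (by simp)]; simpa using hnpal)]
      rw [show (0 + 1 : Nat) = 0 + 1 from rfl, altLoop_shift a t 0 (Nat.zero_le _)]
      push_cast
      ring

-- ===== VERDICT (by name: the statement is the Claim_ definition above) =====
theorem find_symmetrical_part_spec : Claim_equal_find_symmetrical_part := by
  intro seq start _
  unfold Spec_find_symmetrical_part find_symmetrical_part_alt
  exact main_eq seq start
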